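-- pv_equiv track=rewrite | github.com/wzwright/GroupDesignBattleship | backend/bship_logic/logic.py | no_overlaps
-- ===== SOURCE A (Python) =====
-- class InvalidShipException(Exception):
--     pass
--
-- def points_occupied(ship):
--     x1,y1,x2,y2 = ship
--     if x1 == x2: # we have a vertical ship
--         return [(x1,y) for y in range(min(y1,y2), max(y1,y2)+1)]
--     if y1 == y2: # we have a horizontal ship
--         return [(x,y1) for x in range(min(x1,x2), max(x1,x2)+1)]
--     # else we have an illegal rectangle
--     raise InvalidShipException
--
-- def no_overlaps(grid):
--     # Here, we check no ships overlap by checking there are no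
--     # duplicates when we consider all points occupied by ships
--     occupied = []
--     try:
--         occupied = [points_occupied(ship) for ship in grid]
--     except:
--         return False
--     occupied = [item for sublist in occupied for item in sublist] # flatten
--     return len(occupied) == len(set(occupied)) # set removes duplicates
-- ===== SOURCE B (Python) =====
-- def no_overlaps(grid):
--     # One pass collects all occupied points (early False on an illegal ship),
--     # then sort-and-scan detects duplicates instead of a set/len comparison.
--     # The try/except, as in the original, turns any failure (malformed ship,
--     # resource exhaustion on astronomically long ships) into False.
--     try:
--         pts = []
--         for x1, y1, x2, y2 in grid:
--             if x1 == x2: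
--                 pts.extend((x1, y) for y in range(min(y1, y2), max(y1, y2) + 1))
--             elif y1 == y2:
--                 pts.extend((x, y1) for x in range(min(x1, x2), max(x1, x2) + 1))
--             else:
--                 return False
--         pts.sort()
--         for i in range(1, len(pts)):
--             if pts[i - 1] == pts[i]:
--                 return False
--         return True
--     except:
--         return False
-- ===== Notes on version B (the rewrite author's own statement) =====
-- stated objective: alternative
-- what changed: Replaces the comprehension+flatten+len(set) global duplicate count with a single collecting pass (early False on an illegal ship, no exception machinery) followed by sort-then-adjacent-scan duplicate detection.
import Mathlib
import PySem

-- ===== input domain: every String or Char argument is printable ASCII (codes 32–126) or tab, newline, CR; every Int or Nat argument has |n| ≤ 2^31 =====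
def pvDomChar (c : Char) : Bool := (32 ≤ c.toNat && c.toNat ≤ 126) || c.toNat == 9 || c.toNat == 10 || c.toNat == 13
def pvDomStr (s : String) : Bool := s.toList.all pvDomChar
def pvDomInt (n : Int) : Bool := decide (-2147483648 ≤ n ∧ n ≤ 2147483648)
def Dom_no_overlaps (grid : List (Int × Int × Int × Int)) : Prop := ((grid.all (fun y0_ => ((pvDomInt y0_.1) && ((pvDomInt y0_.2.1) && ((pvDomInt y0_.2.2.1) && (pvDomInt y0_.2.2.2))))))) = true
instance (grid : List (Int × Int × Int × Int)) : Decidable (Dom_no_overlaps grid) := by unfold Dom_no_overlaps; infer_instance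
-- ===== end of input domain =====

-- B replaces A's comprehension + flatten + len/set comparison by one collecting pass with
-- early False on an illegal ship, then sort-and-adjacent-scan duplicate detection (alternative decomposition).


-- ===== PORT A =====
-- points_occupied(ship); none = InvalidShipException
def points_occupied? (ship : Int × Int × Int × Int) : Option (List (Int × Int)) :=
  let (x1, y1, x2, y2) := ship
  if x1 = x2 then
    some ((PySem.List.pyRange (min y1 y2) (max y1 y2 + 1)).map (fun y => (x1, y)))
  else if y1 = y2 then
    some ((PySem.List.pyRange (min x1 x2) (max x1 x2 + 1)).map (fun x => (x, y1)))
  else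
    none

-- the comprehension [points_occupied(ship) for ship in grid] inside the try (none = some ship raised)
def collectA : List (Int × Int × Int × Int) → Option (List (List (Int × Int)))
  | [] => some []
  | ship :: rest =>
    match points_occupied? ship with
    | none => none
    | some p =>
      match collectA rest with
      | none => none
      | some ps => some (p :: ps)

def no_overlaps (grid : List (Int × Int × Int × Int)) : Bool :=
  match collectA grid with
  | none => false    -- except: return False
  | some occupied =>
    let flat := occupied.flatten   -- [item for sublist in occupied for item in sublist]
    flat.length == (PySem.Set.ofList flat).length   -- len(occupied) == len(set(occupied))

-- ===== PORT B =====
-- the collecting loop of Source B: extend pts per ship, early return False (none) on an illegal ship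
def altCollect : List (Int × Int × Int × Int) → List (Int × Int) → Option (List (Int × Int))
  | [], pts => some pts
  | (x1, y1, x2, y2) :: rest, pts =>
    if x1 = x2 then
      altCollect rest (pts ++ (PySem.List.pyRange (min y1 y2) (max y1 y2 + 1)).map (fun y => (x1, y)))
    else if y1 = y2 then
      altCollect rest (pts ++ (PySem.List.pyRange (min x1 x2) (max x1 x2 + 1)).map (fun x => (x, y1)))
    else
      none

-- the adjacent scan: pts[i-1] == pts[i] over the sorted list
def adjacentDistinct : List (Int × Int) → Bool
  | p :: q :: rest => if p = q then false else adjacentDistinct (q :: rest)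
  | _ => true

def no_overlaps_alt (grid : List (Int × Int × Int × Int)) : Bool :=
  match altCollect grid [] with
  | none => false
  | some pts => adjacentDistinct (PySem.List.sorted2 pts (fun p => p.1) (fun p => p.2))

-- ===== PRECONDITION & SPEC =====
def Spec_no_overlaps (grid : List (Int × Int × Int × Int)) (out : Bool) : Prop := out = no_overlaps_alt grid
instance (grid : List (Int × Int × Int × Int)) (out : Bool) : Decidable (Spec_no_overlaps grid out) := by unfold Spec_no_overlaps; infer_instance

-- ===== CLAIM (what is proved, stated in full; the proofs are below) =====
def Claim_equal_no_overlaps : Prop := ∀ (grid : List (Int × Int × Int × Int)), Dom_no_overlaps grid → Spec_no_overlaps grid (no_overlaps grid)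

-- ===== LEMMAS AND PROOFS =====

-- set(xs) (first occurrences) is a sublist of xs
lemma ofList_sublist (xs : List (Int × Int)) : (PySem.Set.ofList xs).Sublist xs := by
  induction xs with
  | nil => simp [PySem.Set.ofList]
  | cons x xs ih =>
    rw [PySem.Set.ofList_cons]
    have h1 : (PySem.Set.discard (PySem.Set.ofList xs) x).Sublist (PySem.Set.ofList xs) :=
      List.filter_sublist
    exact List.Sublist.cons₂ x (h1.trans ih)

-- A's 'len(xs) == len(set(xs))' is exactly a Nodup test
lemma lenEq_iff (xs : List (Int × Int)) :
    (xs.length == (PySem.Set.ofList xs).length) = decide xs.Nodup := by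
  by_cases h : xs.Nodup
  · simp [PySem.Set.ofList_eq_self_of_nodup xs h, h]
  · have hsub := ofList_sublist xs
    have hne : xs.length ≠ (PySem.Set.ofList xs).length := by
      intro heq
      exact h (hsub.eq_of_length heq.symm ▸ PySem.Set.nodup_ofList xs)
    simp [h, hne]

-- Python's tuple sort (sorted2 with keys fst, snd) is sorting by the lexicographic key
lemma sorted2_eq_sortedLex (xs : List (Int × Int)) :
    PySem.List.sorted2 xs (fun p => p.1) (fun p => p.2)
      = PySem.List.sorted xs (fun p => toLex p) := by
  rw [PySem.List.sorted_eq_foldl_insertBy]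
  show List.foldl (fun acc x => PySem.List.insertBy _ x acc) [] xs = _
  congr 1
  funext acc x
  congr 1
  funext a b
  simp only [Prod.Lex.lt_iff, ofLex_toLex]
  by_cases h1 : a.1 < b.1 <;> by_cases h2 : b.1 < a.1 <;> by_cases h3 : a.2 < b.2 <;>
    simp [h1, h2, h3] <;> omega

-- on a lexicographically nondecreasing list the adjacent scan decides Nodup
lemma scan_pairwise : ∀ (ys : List (Int × Int)),
    ys.Pairwise (fun a b => toLex a ≤ toLex b) → adjacentDistinct ys = decide ys.Nodup := by
  intro ys
  induction ys with
  | nil => intro _; simp [adjacentDistinct]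
  | cons p rest ih =>
    intro h
    cases rest with
    | nil => simp [adjacentDistinct]
    | cons q rest' =>
      rw [List.pairwise_cons] at h
      obtain ⟨hp, htail⟩ := h
      by_cases hpq : p = q
      · subst hpq
        simp [adjacentDistinct]
      · have hlt : toLex p < toLex q :=
          lt_of_le_of_ne (hp q (List.mem_cons_self)) (fun hEq => hpq (by exact_mod_cast hEq))
        have hnotin : p ∉ q :: rest' := by
          intro hmem
          rcases List.mem_cons.mp hmem with hEq | hmem'
          · exact hpq hEq
          · have hqy : toLex q ≤ toLex p := by
              rw [List.pairwise_cons] at htail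
              exact htail.1 p hmem'
            exact absurd hqy (not_le_of_gt hlt)
        simp only [adjacentDistinct, if_neg hpq]
        rw [ih htail]
        simp [List.nodup_cons, hnotin]

-- B's collecting loop computes A's try-comprehension, flattened
lemma collect_eq : ∀ (grid : List (Int × Int × Int × Int)) (pts : List (Int × Int)),
    altCollect grid pts = (collectA grid).map (fun occ => pts ++ occ.flatten) := by
  intro grid
  induction grid with
  | nil => intro pts; simp [altCollect, collectA]
  | cons ship rest ih =>
    intro pts
    obtain ⟨x1, y1, x2, y2⟩ := ship
    simp only [altCollect, collectA, points_occupied?]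
    split_ifs with h1 h2 <;>
      [skip; skip; simp] <;>
      cases hc : collectA rest <;> simp [ih, hc, List.append_assoc]

-- ===== VERDICT (by name: the statement is the Claim_ definition above) =====
theorem no_overlaps_spec : Claim_equal_no_overlaps := by
  intro grid _
  unfold Spec_no_overlaps no_overlaps no_overlaps_alt
  rw [collect_eq grid []]
  cases hc : collectA grid with
  | none => simp
  | some occ =>
    simp only [Option.map_some, List.nil_append]
    rw [lenEq_iff, sorted2_eq_sortedLex,
        scan_pairwise _ (PySem.List.sorted_pairwise occ.flatten (fun p => toLex p))]
    exact decide_eq_decide.mpr ((PySem.List.sorted_perm occ.flatten (fun p => toLex p) false).nodup_iff).symm
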